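-- pv_equiv track=rewrite | github.com/pavlickosamuel/Priklady-zoznamy | priklady.py | coho_je_viac
-- ===== SOURCE A (Python) =====
-- def coho_je_viac(z: list) -> str:
--     parne = 0
--     neparne = 0
--     for prvok in range(len(z)):
--         if prvok % 2 == 0:
--             parne += 1
--         else:
--             neparne += 1
--     if parne > neparne:
--         return "parne"
--     elif neparne > parne:
--         return "neparne"
--     else:
--         return "rovnake"
-- ===== SOURCE B (Python) =====
-- def coho_je_viac(z: list) -> str:
--     # indices 0..len(z)-1 contain one more even index iff len(z) is odd
--     return "parne" if len(z) % 2 == 1 else "rovnake"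
-- ===== Notes on version B (the rewrite author's own statement) =====
-- stated objective: faster
-- what changed: Replaced the index-counting loop by a closed form: even indices outnumber odd ones exactly when len(z) is odd, otherwise they tie, so B returns from len(z)%2 alone.
import Mathlib
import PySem

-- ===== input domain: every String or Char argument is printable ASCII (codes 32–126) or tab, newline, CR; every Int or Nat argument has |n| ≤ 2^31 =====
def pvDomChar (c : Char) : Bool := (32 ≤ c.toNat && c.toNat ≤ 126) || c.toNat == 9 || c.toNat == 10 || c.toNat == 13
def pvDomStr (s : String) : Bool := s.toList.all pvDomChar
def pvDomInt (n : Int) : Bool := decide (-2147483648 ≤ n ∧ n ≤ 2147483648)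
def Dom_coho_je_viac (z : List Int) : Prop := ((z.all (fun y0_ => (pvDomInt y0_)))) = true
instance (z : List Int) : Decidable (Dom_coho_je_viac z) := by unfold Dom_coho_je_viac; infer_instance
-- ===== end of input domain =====

-- B replaces A's O(n) index-counting loop by the O(1) closed form from len(z) % 2.

-- ===== PORT A =====
-- literal port: count even/odd loop indices over range(len(z)), then compare
def coho_je_viac (z : List Int) : String :=
  let counts :=
    (PySem.List.pyRange 0 z.length 1).foldl
      (fun (s : Int × Int) (prvok : Int) =>
        if PySem.Int.mod prvok 2 == 0 then (s.1 + 1, s.2) else (s.1, s.2 + 1))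
      (0, 0)
  if counts.1 > counts.2 then "parne"
  else if counts.2 > counts.1 then "neparne"
  else "rovnake"

-- ===== PORT B =====
def coho_je_viac_alt (z : List Int) : String :=
  if PySem.Int.mod z.length 2 == 1 then "parne" else "rovnake"

-- ===== PRECONDITION & SPEC =====
def Spec_coho_je_viac (z : List Int) (out : String) : Prop := out = coho_je_viac_alt z
instance (z : List Int) (out : String) : Decidable (Spec_coho_je_viac z out) := by unfold Spec_coho_je_viac; infer_instance

-- ===== CLAIM (what is proved, stated in full; the proofs are below) =====
def Claim_equal_coho_je_viac : Prop := ∀ (z : List Int), Dom_coho_je_viac z → Spec_coho_je_viac z (coho_je_viac z)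

-- ===== LEMMAS AND PROOFS =====
theorem coho_loop_counts (n : Nat) :
    (PySem.List.pyRange 0 (n : Int) 1).foldl
      (fun (s : Int × Int) (prvok : Int) =>
        if PySem.Int.mod prvok 2 == 0 then (s.1 + 1, s.2) else (s.1, s.2 + 1))
      (0, 0)
    = ((((n + 1) / 2 : Nat) : Int), ((n / 2 : Nat) : Int)) := by
  induction n with
  | zero => simp [PySem.List.pyRange]
  | succ n ih =>
    have h : ((n + 1 : Nat) : Int) = (n : Int) + 1 := by push_cast; ring
    rw [h, PySem.List.pyRange_one_succ_right (by positivity), List.foldl_append, ih]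
    simp only [List.foldl_cons, List.foldl_nil, PySem.Int.mod_natCast]
    rcases Nat.even_or_odd n with he | ho
    · obtain ⟨k, hk⟩ := he
      subst hk
      have hm : (k + k) % 2 = 0 := by omega
      rw [show (2:Int) = ((2:Nat):Int) from rfl, PySem.Int.mod_natCast, hm]
      norm_num [Prod.mk.injEq]
      refine ⟨by push_cast; omega, by push_cast; omega⟩
    · obtain ⟨k, hk⟩ := ho
      subst hk
      have hm : (2 * k + 1) % 2 = 1 := by omega
      rw [show (2:Int) = ((2:Nat):Int) from rfl, PySem.Int.mod_natCast, hm]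
      norm_num [Prod.mk.injEq]
      refine ⟨by push_cast; omega, by push_cast; omega⟩

-- ===== VERDICT (by name: the statement is the Claim_ definition above) =====
theorem coho_je_viac_spec : Claim_equal_coho_je_viac := by
  intro z _
  show _ = _
  unfold coho_je_viac coho_je_viac_alt
  rw [coho_loop_counts z.length]
  simp only [PySem.Int.mod_natCast]
  rcases Nat.even_or_odd z.length with he | ho
  · obtain ⟨k, hk⟩ := he
    rw [hk]
    have h1 : (k + k + 1) / 2 = k := by omega
    have h2 : (k + k) / 2 = k := by omega
    have h3 : (k + k) % 2 = 0 := by omega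
    rw [show (2:Int) = ((2:Nat):Int) from rfl, PySem.Int.mod_natCast, h3, h1, h2]
    norm_num
  · obtain ⟨k, hk⟩ := ho
    rw [hk]
    have h1 : (2 * k + 1 + 1) / 2 = k + 1 := by omega
    have h2 : (2 * k + 1) / 2 = k := by omega
    have h3 : (2 * k + 1) % 2 = 1 := by omega
    rw [show (2:Int) = ((2:Nat):Int) from rfl, PySem.Int.mod_natCast, h3, h1, h2]
    norm_num
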